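-- pv_equiv track=rewrite | github.com/KateLy1/RK2 | sem1_task3.py | feedAnimals1
-- ===== SOURCE A (Python) =====
-- def feedAnimals1(animals, food):
--     if len(animals) == 0 or len(food) == 0:
--         return 0
--     count = 0
--     feed_an = []
--     eaten = []
--     i = 0
--     while i < (len(food)):
--         j = 0
--         while j < (len(animals)):
--             if food[i] >= animals[j] and i not in eaten and j not in feed_an:
--                 count += 1
--                 feed_an.append(j)
--                 eaten.append(i)
--             j += 1
--         i += 1
--     return count
-- ===== SOURCE B (Python) =====
-- # Segment tree (min over still-hungry animals) answering leftmost animal with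
-- # appetite <= food in O(log A) per food, instead of A's repeated full scans.
--
-- def _minopt(x, y):
--     if x is None:
--         return y
--     if y is None:
--         return x
--     return x if x <= y else y
--
--
-- def _build(animals, lo, hi):
--     # tree node = [min_of_available_leaves_or_None, left, right]; leaf has children None
--     if hi - lo == 1:
--         return [animals[lo], None, None]
--     mid = (lo + hi) // 2
--     l = _build(animals, lo, mid)
--     r = _build(animals, mid, hi)
--     return [_minopt(l[0], r[0]), l, r]
--
--
-- def _take(node, f):
--     # consume the leftmost available leaf with value <= f; True if one was consumed
--     if node[0] is None or node[0] > f: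
--         return False
--     if node[1] is None:
--         node[0] = None
--         return True
--     if not _take(node[1], f):
--         _take(node[2], f)
--     node[0] = _minopt(node[1][0], node[2][0])
--     return True
--
--
-- def feedAnimals1(animals, food):
--     if not animals or not food:
--         return 0
--     tree = _build(animals, 0, len(animals))
--     count = 0
--     for f in food:
--         if _take(tree, f):
--             count += 1
--     return count
-- ===== Notes on version B (the rewrite author's own statement) =====
-- stated objective: faster
-- what changed: Replaces A's nested full rescans (with linear membership tests in the eaten/fed index lists) by a min-segment tree over animal indices: each food does one O(log A) leftmost-available-animal-with-appetite<=food query and marks that leaf consumed.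
import Mathlib
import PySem

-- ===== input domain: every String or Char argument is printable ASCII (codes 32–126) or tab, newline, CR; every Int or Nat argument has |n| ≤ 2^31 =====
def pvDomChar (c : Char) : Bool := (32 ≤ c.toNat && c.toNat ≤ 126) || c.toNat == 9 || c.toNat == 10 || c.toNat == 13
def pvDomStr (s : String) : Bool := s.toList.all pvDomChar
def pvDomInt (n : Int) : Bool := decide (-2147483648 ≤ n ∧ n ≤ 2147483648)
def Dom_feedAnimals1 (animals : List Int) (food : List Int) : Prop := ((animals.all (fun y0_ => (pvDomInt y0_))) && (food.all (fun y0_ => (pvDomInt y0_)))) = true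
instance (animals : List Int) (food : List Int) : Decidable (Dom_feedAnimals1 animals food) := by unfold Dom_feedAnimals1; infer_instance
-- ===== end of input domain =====

-- B replaces A's nested rescans by a min-segment tree answering, per food, the
-- leftmost still-hungry animal with appetite <= food (objective: faster).


-- ===== PORT A =====
-- inner `while j` body: one step of A's scan over animal indices
def aInner (animals : List Int) (fi : Int) (i : Nat) (st : Int × List Nat × List Nat) (j : Nat) : Int × List Nat × List Nat :=
  if animals.getD j 0 ≤ fi ∧ i ∉ st.2.2 ∧ j ∉ st.2.1 then
    (st.1 + 1, st.2.1 ++ [j], st.2.2 ++ [i])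
  else st

def feedAnimals1 (animals : List Int) (food : List Int) : Int :=
  if animals.length = 0 ∨ food.length = 0 then 0
  else
    ((List.range food.length).foldl
      (fun st i => (List.range animals.length).foldl (aInner animals (food.getD i 0) i) st)
      (0, [], [])).1

-- ===== PORT B =====
-- segment-tree node: cached min of still-available leaves (none = all consumed)
inductive Seg where
  | leaf : Option Int → Seg
  | node : Option Int → Seg → Seg → Seg
deriving Repr, DecidableEq

-- _minopt: min ignoring None
def minopt : Option Int → Option Int → Option Int
  | none, y => y
  | some x, none => some x
  | some x, some y => if x ≤ y then some x else some y

def Seg.mn : Seg → Option Int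
  | .leaf v => v
  | .node m _ _ => m

-- _build over animals[lo:hi]; ported on the sublist itself (relative mid = length / 2)
def buildSeg : List Int → Seg
  | [] => .leaf none
  | [a] => .leaf (some a)
  | a :: b :: rest =>
      let l := a :: b :: rest
      let mid := l.length / 2
      let lt := buildSeg (l.take mid)
      let rt := buildSeg (l.drop mid)
      .node (minopt lt.mn rt.mn) lt rt
termination_by l => l.length
decreasing_by
  · simp; omega
  · simp; omega

-- _take: consume leftmost available leaf with value ≤ f; none = consumed nothing (False)
def segTake (t : Seg) (f : Int) : Option Seg :=
  match t with
  | .leaf v =>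
    match v with
    | none => none
    | some a => if f < a then none else some (.leaf none)
  | .node m l r =>
    match m with
    | none => none
    | some m' =>
      if f < m' then none
      else
        match segTake l f with
        | some l' => some (.node (minopt l'.mn r.mn) l' r)
        | none =>
          match segTake r f with
          | some r' => some (.node (minopt l.mn r'.mn) l r')
          | none => some (.node (minopt l.mn r.mn) l r)

def bStep (st : Int × Seg) (f : Int) : Int × Seg :=
  match segTake st.2 f with
  | some t' => (st.1 + 1, t')
  | none => st

def feedAnimals1_alt (animals : List Int) (food : List Int) : Int :=
  if animals.length = 0 ∨ food.length = 0 then 0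
  else (food.foldl bStep (0, buildSeg animals)).1

-- ===== PRECONDITION & SPEC =====
def Spec_feedAnimals1 (animals : List Int) (food : List Int) (out : Int) : Prop := out = feedAnimals1_alt animals food
instance (animals : List Int) (food : List Int) (out : Int) : Decidable (Spec_feedAnimals1 animals food out) := by unfold Spec_feedAnimals1; infer_instance

-- ===== CLAIM (what is proved, stated in full; the proofs are below) =====
def Claim_equal_feedAnimals1 : Prop := ∀ (animals : List Int) (food : List Int), Dom_feedAnimals1 animals food → Spec_feedAnimals1 animals food (feedAnimals1 animals food)

-- ===== LEMMAS AND PROOFS =====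

-- reference model: the list of still-available appetites, in animal order
def markFirst (f : Int) : List (Option Int) → Option (List (Option Int))
  | [] => none
  | none :: t => (markFirst f t).map (none :: ·)
  | some a :: t => if a ≤ f then some (none :: t) else (markFirst f t).map (some a :: ·)

def refStep (st : Int × List (Option Int)) (f : Int) : Int × List (Option Int) :=
  match markFirst f st.2 with
  | some ol => (st.1 + 1, ol)
  | none => st

def view (l : List Int) (fa : List Nat) (s : Nat) : List (Option Int) :=
  match l with
  | [] => []
  | a :: t => (if s ∈ fa then none else some a) :: view t fa (s + 1)

def minList (xs : List (Option Int)) : Option Int := xs.foldr minopt none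

def Seg.leaves : Seg → List (Option Int)
  | .leaf v => [v]
  | .node _ l r => l.leaves ++ r.leaves

def Seg.WF : Seg → Prop
  | .leaf _ => True
  | .node m l r => l.WF ∧ r.WF ∧ m = minopt l.mn r.mn

-- ---- A side ----

lemma inner_noop (animals : List Int) (fi : Int) (i : Nat) (js : List Nat)
    (c : Int) (fa e : List Nat) (hi : i ∈ e) :
    js.foldl (aInner animals fi i) (c, fa, e) = (c, fa, e) := by
  induction js with
  | nil => rfl
  | cons j js ih => simp [aInner, hi, ih]

lemma inner_fold (animals : List Int) (fi : Int) (i : Nat) (js : List Nat)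
    (c : Int) (fa e : List Nat) (hi : i ∉ e) :
    js.foldl (aInner animals fi i) (c, fa, e) =
      match js.find? (fun j => decide (j ∉ fa ∧ animals.getD j 0 ≤ fi)) with
      | some j => (c + 1, fa ++ [j], e ++ [i])
      | none => (c, fa, e) := by
  induction js with
  | nil => rfl
  | cons j js ih =>
    by_cases hj : j ∉ fa ∧ animals.getD j 0 ≤ fi
    · rw [List.find?_cons_of_pos (by simpa using hj)]
      simp only [List.foldl_cons]
      have hstep : aInner animals fi i (c, fa, e) j = (c + 1, fa ++ [j], e ++ [i]) := by
        unfold aInner; rw [if_pos]; exact ⟨hj.2, hi, hj.1⟩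
      rw [hstep]
      exact inner_noop animals fi i js (c + 1) (fa ++ [j]) (e ++ [i]) (by simp)
    · rw [List.find?_cons_of_neg (by simpa using hj)]
      simp only [List.foldl_cons]
      have hstep : aInner animals fi i (c, fa, e) j = (c, fa, e) := by
        unfold aInner; rw [if_neg]; tauto
      rw [hstep]
      exact ih

lemma view_append_gt (l : List Int) (fa : List Nat) (j : Nat) :
    ∀ s, j < s → view l (fa ++ [j]) s = view l fa s := by
  induction l with
  | nil => intro s _; rfl
  | cons a t ih =>
    intro s hs
    have : (s ∈ fa ++ [j]) = (s ∈ fa) := by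
      simp [List.mem_append]; omega
    simp [view, this, ih (s+1) (by omega)]

lemma getD_drop_head (animals : List Int) (s : Nat) (a : Int) (t : List Int)
    (h : animals.drop s = a :: t) : animals.getD s 0 = a := by
  have h0 : animals[s]? = (animals.drop s)[0]? := by
    simp
  simp [List.getD, h, h0]

lemma drop_succ_of_drop (animals : List Int) (s : Nat) (a : Int) (t : List Int)
    (h : animals.drop s = a :: t) : animals.drop (s + 1) = t := by
  have : animals.drop (s+1) = (animals.drop s).drop 1 := by
    rw [List.drop_drop]
  simp [this, h]

lemma inner_mark (animals : List Int) (fi : Int) :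
    ∀ (l : List Int) (s : Nat) (fa : List Nat), l = animals.drop s →
    match (List.range' s l.length).find? (fun j => decide (j ∉ fa ∧ animals.getD j 0 ≤ fi)) with
    | some j => markFirst fi (view l fa s) = some (view l (fa ++ [j]) s)
    | none => markFirst fi (view l fa s) = none := by
  intro l
  induction l with
  | nil => intro s fa _; simp [view, markFirst]
  | cons a t ih =>
    intro s fa hdrop
    have ha : animals.getD s 0 = a := getD_drop_head animals s a t hdrop.symm
    have ha' : animals[s]?.getD 0 = a := by simpa [List.getD] using ha
    have ht : t = animals.drop (s+1) := (drop_succ_of_drop animals s a t hdrop.symm).symm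
    have hrange : List.range' s (a :: t).length = s :: List.range' (s+1) t.length := by
      simp [List.range'_succ]
    by_cases hmem : s ∈ fa
    · -- head already fed: view head = none
      have hpred : (decide (s ∉ fa ∧ animals.getD s 0 ≤ fi)) = false := by simp [hmem]
      have := ih (s+1) fa ht
      rw [hrange]
      simp only [List.find?, hpred]
      cases hfind : (List.range' (s+1) t.length).find? (fun j => decide (j ∉ fa ∧ animals.getD j 0 ≤ fi)) with
      | none =>
        rw [hfind] at this
        simp [view, hmem, markFirst, this]
      | some j =>
        rw [hfind] at this
        have hj : s + 1 ≤ j := by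
          have := List.mem_range'.mp (List.mem_of_find?_eq_some hfind)
          omega
        have hsj : (s ∈ fa ++ [j]) = True := by simp [hmem]
        simp [view, hmem, markFirst, this, hsj]
    · by_cases hle : a ≤ fi
      · -- head matches: find? = some s
        have hpred : (decide (s ∉ fa ∧ animals.getD s 0 ≤ fi)) = true := by simp [List.getD, hmem, ha', hle]
        rw [hrange]
        simp only [List.find?, hpred]
        simp [view, hmem, markFirst, hle, view_append_gt t fa s (s+1) (by omega)]
      · have hpred : (decide (s ∉ fa ∧ animals.getD s 0 ≤ fi)) = false := by simp [List.getD, hmem, ha', hle]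
        have := ih (s+1) fa ht
        rw [hrange]
        simp only [List.find?, hpred]
        cases hfind : (List.range' (s+1) t.length).find? (fun j => decide (j ∉ fa ∧ animals.getD j 0 ≤ fi)) with
        | none =>
          rw [hfind] at this
          simp [view, hmem, markFirst, hle, this]
        | some j =>
          rw [hfind] at this
          have hj : s + 1 ≤ j := by
            have := List.mem_range'.mp (List.mem_of_find?_eq_some hfind)
            omega
          have hsj : (s ∈ fa ++ [j]) = (s ∈ fa) := by simp; omega
          simp [view, hmem, markFirst, hle, this, hsj]

lemma outer_sim (animals food : List Int) :
    ∀ (fl : List Int) (k : Nat) (c : Int) (fa e : List Nat),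
    fl = food.drop k → (∀ x ∈ e, x < k) →
    ((List.range' k fl.length).foldl
        (fun st i => (List.range animals.length).foldl (aInner animals (food.getD i 0) i) st)
        (c, fa, e)).1
      = (fl.foldl refStep (c, view animals fa 0)).1 := by
  intro fl
  induction fl with
  | nil => intro k c fa e _ _; rfl
  | cons f0 ft ih =>
    intro k c fa e hdrop he
    have hf0 : food.getD k 0 = f0 := getD_drop_head food k f0 ft hdrop.symm
    have hft : ft = food.drop (k+1) := (drop_succ_of_drop food k f0 ft hdrop.symm).symm
    have hk : k ∉ e := fun h => absurd (he k h) (by omega)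
    have hrange : List.range' k (f0 :: ft).length = k :: List.range' (k+1) ft.length := by
      simp [List.range'_succ]
    rw [hrange]
    simp only [List.foldl_cons]
    have hmark := inner_mark animals (food.getD k 0) animals 0 fa (by simp)
    rw [inner_fold animals (food.getD k 0) k (List.range animals.length) c fa e hk]
    rw [List.range_eq_range'] at *
    cases hfind : (List.range' 0 animals.length).find? (fun j => decide (j ∉ fa ∧ animals.getD j 0 ≤ food.getD k 0)) with
    | some j =>
      rw [hfind] at hmark
      have hmark' : markFirst f0 (view animals fa 0) = some (view animals (fa ++ [j]) 0) := by
        rw [← hf0]; exact hmark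
      have hstep : refStep (c, view animals fa 0) f0 = (c + 1, view animals (fa ++ [j]) 0) := by
        simp [refStep, hmark']
      rw [hstep]
      refine ih (k+1) (c+1) (fa ++ [j]) (e ++ [k]) hft ?_
      intro x hx
      simp at hx
      rcases hx with h | h
      · exact Nat.lt_succ_of_lt (he x h)
      · omega
    | none =>
      rw [hfind] at hmark
      have hmark' : markFirst f0 (view animals fa 0) = none := by
        rw [← hf0]; exact hmark
      have hstep : refStep (c, view animals fa 0) f0 = (c, view animals fa 0) := by
        simp [refStep, hmark']
      rw [hstep]
      exact ih (k+1) c fa e hft (fun x hx => Nat.lt_succ_of_lt (he x hx))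

-- ---- B side ----

lemma minopt_assoc (x y z : Option Int) : minopt (minopt x y) z = minopt x (minopt y z) := by
  cases x with
  | none => rfl
  | some x =>
    cases y with
    | none => rfl
    | some y =>
      cases z with
      | none => simp only [minopt]; split_ifs <;> rfl
      | some z =>
        simp only [minopt]
        split_ifs <;> simp only [minopt] <;> split_ifs <;> first | rfl | omega

lemma minList_cons (o : Option Int) (t : List (Option Int)) :
    minList (o :: t) = minopt o (minList t) := rfl

lemma foldr_minopt (xs : List (Option Int)) (m : Option Int) :
    xs.foldr minopt m = minopt (minList xs) m := by
  induction xs with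
  | nil => rfl
  | cons x t ih =>
    simp only [minList, List.foldr_cons]
    rw [ih, ← minopt_assoc]
    rfl

lemma minList_append (xs ys : List (Option Int)) :
    minList (xs ++ ys) = minopt (minList xs) (minList ys) := by
  simp only [minList, List.foldr_append]
  exact foldr_minopt xs (ys.foldr minopt none)

lemma mn_spec (t : Seg) (hw : t.WF) : t.mn = minList t.leaves := by
  induction t with
  | leaf v => cases v <;> rfl
  | node m l r ihl ihr =>
    obtain ⟨hl, hr, hm⟩ := hw
    show m = minList (l.leaves ++ r.leaves)
    rw [hm, ihl hl, ihr hr, minList_append]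

lemma markFirst_none_of_gt (f : Int) (xs : List (Option Int))
    (h : ∀ a, minList xs = some a → f < a) : markFirst f xs = none := by
  induction xs with
  | nil => rfl
  | cons o t ih =>
    cases o with
    | none =>
      have h' : ∀ a, minList t = some a → f < a := by
        intro a ha; exact h a (by rw [minList_cons]; simpa [minopt] using ha)
      simp [markFirst, ih h']
    | some a =>
      have key : ∀ b, minopt (some a) (minList t) = some b → f < b := by
        intro b hb; exact h b (by rw [minList_cons]; exact hb)
      cases hmt : minList t with
      | none =>
        have hfa : f < a := key a (by rw [hmt]; rfl)
        have ihh : markFirst f t = none := by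
          refine ih ?_; intro b hb; rw [hmt] at hb; cases hb
        have hred : markFirst f (some a :: t) = (markFirst f t).map (some a :: ·) := by
          show (if a ≤ f then some (none :: t) else (markFirst f t).map (some a :: ·)) = _
          rw [if_neg (by omega : ¬ a ≤ f)]
        rw [hred, ihh]; rfl
      | some b =>
        have hk : f < if a ≤ b then a else b := by
          refine key _ ?_
          rw [hmt]; simp only [minopt]; split_ifs <;> rfl
        have hfa : f < a := by split_ifs at hk <;> omega
        have hfb : f < b := by split_ifs at hk <;> omega
        have ihh : markFirst f t = none := by
          refine ih ?_; intro c hc; rw [hmt] at hc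
          injection hc with hc; omega
        have hred : markFirst f (some a :: t) = (markFirst f t).map (some a :: ·) := by
          show (if a ≤ f then some (none :: t) else (markFirst f t).map (some a :: ·)) = _
          rw [if_neg (by omega : ¬ a ≤ f)]
        rw [hred, ihh]; rfl

lemma gt_of_markFirst_none (f : Int) (xs : List (Option Int))
    (h : markFirst f xs = none) : ∀ a, minList xs = some a → f < a := by
  induction xs with
  | nil => intro a ha; simp [minList] at ha
  | cons o t ih =>
    cases o with
    | none =>
      simp only [markFirst, Option.map_eq_none_iff] at h
      intro a ha
      rw [minList_cons] at ha
      simp only [minopt] at ha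
      exact ih h a ha
    | some a =>
      have hfa : ¬ a ≤ f := by
        by_contra hc
        simp [markFirst, hc] at h
      simp only [markFirst, if_neg hfa, Option.map_eq_none_iff] at h
      intro b hb
      rw [minList_cons] at hb
      cases hmt : minList t with
      | none =>
        rw [hmt] at hb; simp only [minopt] at hb
        injection hb with hb; omega
      | some c =>
        have hfc := ih h c hmt
        rw [hmt] at hb; simp only [minopt] at hb
        split_ifs at hb <;> (injection hb with hb; omega)

lemma markFirst_append (f : Int) (xs ys : List (Option Int)) :
    markFirst f (xs ++ ys) =
      match markFirst f xs with
      | some xs' => some (xs' ++ ys)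
      | none => (markFirst f ys).map (xs ++ ·) := by
  induction xs with
  | nil => cases h : markFirst f ys <;> simp [markFirst, h]
  | cons o t ih =>
    cases o with
    | none =>
      simp only [List.cons_append, markFirst, ih]
      cases markFirst f t <;> cases markFirst f ys <;> simp
    | some a =>
      by_cases hle : a ≤ f
      · simp [markFirst, hle]
      · simp only [List.cons_append, markFirst, if_neg hle, ih]
        cases markFirst f t <;> cases markFirst f ys <;> simp

lemma segTake_spec (f : Int) : ∀ (t : Seg), t.WF →
    match segTake t f with
    | none => markFirst f t.leaves = none
    | some t' => t'.WF ∧ markFirst f t.leaves = some t'.leaves := by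
  intro t
  induction t with
  | leaf v =>
    intro _
    cases v with
    | none => simp [segTake, Seg.leaves, markFirst]
    | some a =>
      by_cases hle : f < a
      · simp [segTake, hle, Seg.leaves, markFirst]
      · simp [segTake, hle, Seg.leaves, markFirst, (by omega : a ≤ f), Seg.WF]
  | node m l r ihl ihr =>
    intro hw
    obtain ⟨hl, hr, hm⟩ := hw
    have ihl' := ihl hl
    have ihr' := ihr hr
    cases hmv : m with
    | none =>
      -- all consumed: minList leaves = none, markFirst = none
      have : ∀ a, minList (Seg.node m l r).leaves = some a → f < a := by
        intro a ha
        rw [← mn_spec (Seg.node m l r) (show l.WF ∧ r.WF ∧ m = minopt l.mn r.mn from ⟨hl, hr, hm⟩)] at ha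
        rw [hmv] at ha; exact absurd ha (by simp [Seg.mn])
      simp only [segTake]
      exact markFirst_none_of_gt f _ this
    | some m' =>
      by_cases hfm : f < m'
      · have : ∀ a, minList (Seg.node m l r).leaves = some a → f < a := by
          intro a ha
          rw [← mn_spec (Seg.node m l r) (show l.WF ∧ r.WF ∧ m = minopt l.mn r.mn from ⟨hl, hr, hm⟩)] at ha
          rw [hmv] at ha
          simp [Seg.mn] at ha
          omega
        simp only [segTake, if_pos hfm]
        exact markFirst_none_of_gt f _ this
      · simp only [segTake, if_neg hfm]
        cases htl : segTake l f with
        | some l' =>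
          rw [htl] at ihl'
          obtain ⟨hwl', hml'⟩ := ihl'
          show (Seg.node (minopt l'.mn r.mn) l' r).WF ∧
            markFirst f (Seg.node m l r).leaves = some ((Seg.node (minopt l'.mn r.mn) l' r).leaves)
          refine ⟨show l'.WF ∧ r.WF ∧ minopt l'.mn r.mn = minopt l'.mn r.mn from ⟨hwl', hr, rfl⟩, ?_⟩
          simp [Seg.leaves, markFirst_append, hml']
        | none =>
          rw [htl] at ihl'
          cases htr : segTake r f with
          | some r' =>
            rw [htr] at ihr'
            obtain ⟨hwr', hmr'⟩ := ihr'
            show (Seg.node (minopt l.mn r'.mn) l r').WF ∧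
              markFirst f (Seg.node m l r).leaves = some ((Seg.node (minopt l.mn r'.mn) l r').leaves)
            refine ⟨show l.WF ∧ r'.WF ∧ minopt l.mn r'.mn = minopt l.mn r'.mn from ⟨hl, hwr', rfl⟩, ?_⟩
            simp [Seg.leaves, markFirst_append, ihl', hmr']
          | none =>
            -- impossible: min ≤ f but both children fail
            exfalso
            rw [htr] at ihr'
            have hlb := gt_of_markFirst_none f _ ihl'
            have hrb := gt_of_markFirst_none f _ ihr'
            have hmm : some m' = minopt (minList l.leaves) (minList r.leaves) := by
              rw [← mn_spec _ hl, ← mn_spec _ hr, ← hm, hmv]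
            cases hml : minList l.leaves with
            | none =>
              cases hmr : minList r.leaves with
              | none => rw [hml, hmr] at hmm; simp [minopt] at hmm
              | some b =>
                have := hrb b hmr
                rw [hml, hmr] at hmm; simp [minopt] at hmm; omega
            | some a =>
              have hfa := hlb a hml
              cases hmr : minList r.leaves with
              | none => rw [hml, hmr] at hmm; simp [minopt] at hmm; omega
              | some b =>
                have := hrb b hmr
                rw [hml, hmr] at hmm; simp only [minopt] at hmm
                split_ifs at hmm <;> simp only [Option.some.injEq] at hmm <;> omega

lemma buildSeg_spec : ∀ (l : List Int), l ≠ [] →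
    (buildSeg l).WF ∧ (buildSeg l).leaves = l.map some := by
  intro l
  induction l using buildSeg.induct with
  | case1 => intro h; exact absurd rfl h
  | case2 a => intro _; rw [buildSeg]; exact ⟨trivial, rfl⟩
  | case3 a b rest l mid ihl ihr =>
    intro _
    have hlen : (a :: b :: rest).length = rest.length + 2 := by simp
    have htne : (a :: b :: rest).take ((a :: b :: rest).length / 2) ≠ [] :=
      List.ne_nil_of_length_pos (by rw [List.length_take, hlen]; omega)
    have hdne : (a :: b :: rest).drop ((a :: b :: rest).length / 2) ≠ [] :=
      List.ne_nil_of_length_pos (by rw [List.length_drop, hlen]; omega)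
    obtain ⟨hwl, hll⟩ := ihl htne
    obtain ⟨hwr, hlr⟩ := ihr hdne
    rw [buildSeg]
    refine ⟨show _ ∧ _ ∧ _ from ⟨hwl, hwr, rfl⟩, ?_⟩
    show Seg.leaves _ ++ Seg.leaves _ = _
    rw [hll, hlr, ← List.map_append, List.take_append_drop]

lemma bfold_ref : ∀ (fl : List Int) (c : Int) (t : Seg), t.WF →
    (fl.foldl bStep (c, t)).1 = (fl.foldl refStep (c, t.leaves)).1 := by
  intro fl
  induction fl with
  | nil => intro c t _; rfl
  | cons f ft ih =>
    intro c t hw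
    have := segTake_spec f t hw
    cases ht : segTake t f with
    | some t' =>
      rw [ht] at this
      obtain ⟨hw', hm⟩ := this
      simp only [List.foldl_cons, bStep, ht, refStep, hm]
      exact ih (c+1) t' hw'
    | none =>
      rw [ht] at this
      simp only [List.foldl_cons, bStep, ht, refStep, this]
      exact ih c t hw

lemma view_nil_fa : ∀ (l : List Int) (s : Nat), view l [] s = l.map some := by
  intro l
  induction l with
  | nil => intro s; rfl
  | cons a t ih => intro s; simp [view, ih]

-- ===== VERDICT (by name: the statement is the Claim_ definition above) =====
theorem feedAnimals1_spec : Claim_equal_feedAnimals1 := by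
  intro animals food _
  unfold Spec_feedAnimals1 feedAnimals1 feedAnimals1_alt
  by_cases hg : animals.length = 0 ∨ food.length = 0
  · rw [if_pos hg, if_pos hg]
  · rw [if_neg hg, if_neg hg]
    have hane : animals ≠ [] := by
      intro h
      exact hg (Or.inl (by simp [h]))
    have hA := outer_sim animals food food 0 0 [] [] (by simp) (by simp)
    simp only [List.range_eq_range'] at hA ⊢
    rw [hA, view_nil_fa]
    obtain ⟨hwf, hlv⟩ := buildSeg_spec animals hane
    rw [bfold_ref food 0 (buildSeg animals) hwf, hlv]
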